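-- pv_equiv track=rewrite | github.com/Zaine-04/ipsnipe | ipsnipe/scanners/domain_manager.py | get_best_domain
-- ===== SOURCE A (Python) =====
-- from typing import List, Dict, Tuple, Optional
--
-- def get_best_domain(domains: List[str]) -> Optional[str]:
--     """Get the best domain to use for scanning"""
--     if not domains:
--         return None
--
--     # Priority order for domain selection
--     priorities = [
--         lambda d: d.endswith('.htb'),      # HTB domains first
--         lambda d: not d.startswith('www.'), # Non-www domains
--         lambda d: len(d.split('.')) == 2,   # Simple domains
--         lambda d: 'machine' in d or 'target' in d,  # Common names
--     ]
--
--     for priority_func in priorities: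
--         for domain in domains:
--             if priority_func(domain):
--                 return domain
--
--     # Return first domain if no priority matches
--     return domains[0]
-- ===== SOURCE B (Python) =====
-- def get_best_domain(domains):
--     """Get the best domain to use for scanning (argmin over priority rank)."""
--     if not domains:
--         return None
--
--     priorities = [
--         lambda d: d.endswith('.htb'),
--         lambda d: not d.startswith('www.'),
--         lambda d: len(d.split('.')) == 2,
--         lambda d: 'machine' in d or 'target' in d,
--     ]
--
--     def rank(d):
--         for i, p in enumerate(priorities):
--             if p(d):
--                 return i
--         return len(priorities)
--
--     return min(domains, key=rank)
-- ===== Notes on version B (the rewrite author's own statement) =====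
-- stated objective: idiomatic
-- what changed: Replaces the nested predicate-outer/domain-inner early-return loops with a per-domain rank helper (index of the first satisfied predicate, 4 if none) and a single stable min(domains, key=rank).
import Mathlib
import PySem

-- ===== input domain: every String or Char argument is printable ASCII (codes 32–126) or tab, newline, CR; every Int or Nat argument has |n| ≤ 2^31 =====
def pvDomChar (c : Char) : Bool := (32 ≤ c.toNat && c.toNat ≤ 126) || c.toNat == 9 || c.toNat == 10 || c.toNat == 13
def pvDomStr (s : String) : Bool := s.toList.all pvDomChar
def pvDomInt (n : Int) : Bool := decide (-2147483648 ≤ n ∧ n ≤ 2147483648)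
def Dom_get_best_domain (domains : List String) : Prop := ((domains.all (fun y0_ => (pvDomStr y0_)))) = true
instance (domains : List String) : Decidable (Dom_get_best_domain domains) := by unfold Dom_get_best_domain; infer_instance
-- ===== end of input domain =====

-- B replaces A's nested predicate-outer/domain-inner early-return loops by a per-domain
-- rank (index of the first satisfied predicate) and a single stable argmin (idiomatic).


-- the four priority predicates, written identically in A and B (both Python versions
-- use the same lambda list); d.split('.') has a non-empty separator, so Chars.splitOn is exact
def pvPriorities : List (String → Bool) :=
  [ fun d => PySem.Str.endswith d ".htb",
    fun d => !(PySem.Str.startswith d "www."),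
    fun d => (PySem.Chars.splitOn d.toList ['.']).length == 2,
    fun d => PySem.Str.isIn "machine" d || PySem.Str.isIn "target" d ]

-- ===== PORT A =====
def get_best_domain (domains : List String) : Option String :=
  if domains.isEmpty then none
  else
    match pvPriorities.findSome? (fun p => domains.find? p) with
    | some d => some d
    | none => PySem.List.pyGet? domains 0

-- ===== PORT B =====
-- rank d = index of the first predicate d satisfies, or len(priorities) if none
def pvRank (d : String) : Nat :=
  (pvPriorities.findIdx? (fun p => p d)).getD pvPriorities.length

def get_best_domain_alt (domains : List String) : Option String :=
  if domains.isEmpty then none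
  else PySem.List.min? domains pvRank

-- ===== PRECONDITION & SPEC =====
def Spec_get_best_domain (domains : List String) (out : Option String) : Prop := out = get_best_domain_alt domains
instance (domains : List String) (out : Option String) : Decidable (Spec_get_best_domain domains out) := by unfold Spec_get_best_domain; infer_instance

-- ===== CLAIM (what is proved, stated in full; the proofs are below) =====
def Claim_equal_get_best_domain : Prop := ∀ (domains : List String), Dom_get_best_domain domains → Spec_get_best_domain domains (get_best_domain domains)

-- ===== LEMMAS AND PROOFS =====

-- the foldl step PySem.List.min? is made of (Nat key)
def pvStep (k : String → Nat) (acc : Option String) (x : String) : Option String :=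
  match acc with
  | none => some x
  | some m => if k x < k m then some x else some m

lemma pvMin?_eq_foldl (l : List String) (k : String → Nat) :
    PySem.List.min? l k = l.foldl (pvStep k) none := by
  unfold PySem.List.min?
  congr 1
  funext acc x
  cases acc <;> rfl

-- rank relative to an arbitrary predicate list
def pvRankOf (ps : List (String → Bool)) (d : String) : Nat :=
  (ps.findIdx? (fun p => p d)).getD ps.length

lemma pvRank_eq : pvRank = pvRankOf pvPriorities := funext fun _ => rfl

lemma pvRankOf_cons (p : String → Bool) (qs : List (String → Bool)) (d : String) :
    pvRankOf (p :: qs) d = if p d then 0 else pvRankOf qs d + 1 := by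
  unfold pvRankOf
  rw [List.findIdx?_cons]
  by_cases h : p d
  · simp [h]
  · cases hq : qs.findIdx? (fun q => q d) <;> simp [h]

-- the accumulator is kept when nothing beats it
lemma pvFoldl_keep (k : String → Nat) (t : List String) (m : String)
    (h : ∀ x ∈ t, ¬ k x < k m) : t.foldl (pvStep k) (some m) = some m := by
  induction t with
  | nil => rfl
  | cons a t' ih =>
      simp only [List.foldl_cons, pvStep, if_neg (h a (by simp))]
      exact ih (fun x hx => h x (by simp [hx]))

-- with a positive accumulator, the fold returns the first element of rank 0
lemma pvFoldl_first_zero (k : String → Nat) (t : List String) :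
    ∀ (m d0 : String), 0 < k m → t.find? (fun d => k d == 0) = some d0 →
      t.foldl (pvStep k) (some m) = some d0 := by
  induction t with
  | nil => intro m d0 _ h; simp at h
  | cons a t' ih =>
      intro m d0 hm hf
      rw [List.find?_cons] at hf
      cases ha : (k a == 0) with
      | true =>
          simp only [ha, Option.some.injEq] at hf
          subst hf
          have ha0 : k a = 0 := by simpa using ha
          simp only [List.foldl_cons, pvStep, if_pos (by omega : k a < k m)]
          exact pvFoldl_keep k t' a (fun x _ => by omega)
      | false =>
          simp only [ha] at hf
          have ha0 : k a ≠ 0 := by simpa using ha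
          simp only [List.foldl_cons, pvStep]
          by_cases hlt : k a < k m
          · rw [if_pos hlt]; exact ih a d0 (by omega) hf
          · rw [if_neg hlt]; exact ih m d0 hm hf


-- shifting the key by +1 on the accumulator and all elements does not change the fold
lemma pvFoldl_shift (k1 k2 : String → Nat) (t : List String) :
    ∀ (m : String), (∀ d ∈ t, k1 d = k2 d + 1) → k1 m = k2 m + 1 →
      t.foldl (pvStep k1) (some m) = t.foldl (pvStep k2) (some m) := by
  induction t with
  | nil => intro _ _ _; rfl
  | cons a t' ih =>
      intro m ht hm
      have ha := ht a (by simp)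
      have ht' : ∀ d ∈ t', k1 d = k2 d + 1 := fun d hd => ht d (by simp [hd])
      simp only [List.foldl_cons, pvStep]
      by_cases hlt : k2 a < k2 m
      · rw [if_pos (by omega), if_pos hlt]; exact ih a ht' ha
      · rw [if_neg (by omega), if_neg hlt]; exact ih m ht' hm

lemma pvMain (ps : List (String → Bool)) (x : String) (xs : List String) :
    (match ps.findSome? (fun p => (x :: xs).find? p) with
     | some d => some d
     | none => some x) = xs.foldl (pvStep (pvRankOf ps)) (some x) := by
  induction ps with
  | nil =>
      simp only [List.findSome?_nil]
      exact (pvFoldl_keep _ xs x (fun y _ => by simp [pvRankOf])).symm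
  | cons p qs ih =>
      have hpred : (fun d => (pvRankOf (p :: qs) d == 0)) = p := by
        funext d
        rw [pvRankOf_cons]
        by_cases h : p d <;> simp [h]
      rw [List.findSome?_cons]
      cases hf : (x :: xs).find? p with
      | some d0 =>
          rw [← hpred] at hf
          rw [List.find?_cons] at hf
          show some d0 = xs.foldl (pvStep (pvRankOf (p :: qs))) (some x)
          cases hbx : (pvRankOf (p :: qs) x == 0) with
          | true =>
              simp only [hbx, Option.some.injEq] at hf
              subst hf
              have hx0 : pvRankOf (p :: qs) x = 0 := by simpa using hbx
              exact (pvFoldl_keep _ xs x (fun y _ => by omega)).symm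
          | false =>
              simp only [hbx] at hf
              have hx0 : pvRankOf (p :: qs) x ≠ 0 := by simpa using hbx
              exact (pvFoldl_first_zero _ xs x d0 (by omega) hf).symm
      | none =>
          have hnone : ∀ d ∈ x :: xs, p d = false := by
            intro d hd
            simpa using List.find?_eq_none.mp hf d hd
          have hsh : xs.foldl (pvStep (pvRankOf (p :: qs))) (some x)
              = xs.foldl (pvStep (pvRankOf qs)) (some x) := by
            apply pvFoldl_shift
            · intro d hd; rw [pvRankOf_cons, if_neg (by simp [hnone d (by simp [hd])])]
            · rw [pvRankOf_cons, if_neg (by simp [hnone x (by simp)])]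
          show (match qs.findSome? (fun p => (x :: xs).find? p) with
                | some d => some d
                | none => some x) = xs.foldl (pvStep (pvRankOf (p :: qs))) (some x)
          rw [hsh]
          exact ih

-- ===== VERDICT (by name: the statement is the Claim_ definition above) =====
theorem get_best_domain_spec : Claim_equal_get_best_domain := by
  intro domains _
  unfold Spec_get_best_domain get_best_domain get_best_domain_alt
  cases domains with
  | nil => rfl
  | cons x xs =>
      show (match pvPriorities.findSome? (fun p => (x :: xs).find? p) with
            | some d => some d
            | none => PySem.List.pyGet? (x :: xs) 0) = PySem.List.min? (x :: xs) pvRank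
      have hget : PySem.List.pyGet? (x :: xs) 0 = some x := by
        simp [PySem.List.pyGet?, PySem.List.pyIdx?]
      rw [hget, pvMin?_eq_foldl, List.foldl_cons]
      have hstep : pvStep pvRank none x = some x := rfl
      rw [hstep, pvRank_eq]
      exact pvMain pvPriorities x xs
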